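-- pv_equiv track=rewrite | github.com/azharmateen/regex-stepper | regex_stepper/engine.py | _char_in_class
-- ===== SOURCE A (Python) =====
-- def _char_in_class(ch: str, members: str, negated: bool) -> bool:
--     """Check if character matches a character class."""
--     i = 0
--     in_class = False
--     while i < len(members):
--         # Handle ranges like a-z
--         if i + 2 < len(members) and members[i + 1] == "-":
--             if members[i] <= ch <= members[i + 2]:
--                 in_class = True
--                 break
--             i += 3
--         # Handle escaped chars
--         elif members[i] == "\\" and i + 1 < len(members):
--             esc = members[i + 1]
--             if esc == "d" and ch.isdigit():
--                 in_class = True; break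
--             elif esc == "D" and not ch.isdigit():
--                 in_class = True; break
--             elif esc == "w" and (ch.isalnum() or ch == "_"):
--                 in_class = True; break
--             elif esc == "W" and not (ch.isalnum() or ch == "_"):
--                 in_class = True; break
--             elif esc == "s" and ch in " \t\n\r\f\v":
--                 in_class = True; break
--             elif esc == "S" and ch not in " \t\n\r\f\v":
--                 in_class = True; break
--             elif ch == esc:
--                 in_class = True; break
--             i += 2
--         else:
--             if ch == members[i]:
--                 in_class = True
--                 break
--             i += 1
--
--     return (not in_class) if negated else in_class
-- ===== SOURCE B (Python) =====
-- _WS = " \t\n\r\f\v"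
--
--
-- def _token_matches(ch, tok):
--     kind = tok[0]
--     if kind == "range":
--         return tok[1] <= ch <= tok[2]
--     if kind == "escape":
--         e = tok[1]
--         return ((e == "d" and ch.isdigit())
--                 or (e == "D" and not ch.isdigit())
--                 or (e == "w" and (ch.isalnum() or ch == "_"))
--                 or (e == "W" and not (ch.isalnum() or ch == "_"))
--                 or (e == "s" and ch in _WS)
--                 or (e == "S" and ch not in _WS)
--                 or ch == e)
--     return ch == tok[1]
--
--
-- def _tokenize(members):
--     tokens = []
--     i = 0
--     n = len(members)
--     while i < n:
--         if i + 2 < n and members[i + 1] == "-":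
--             tokens.append(("range", members[i], members[i + 2]))
--             i += 3
--         elif members[i] == "\\" and i + 1 < n:
--             tokens.append(("escape", members[i + 1]))
--             i += 2
--         else:
--             tokens.append(("literal", members[i]))
--             i += 1
--     return tokens
--
--
-- def _char_in_class(ch, members, negated):
--     in_class = any(_token_matches(ch, t) for t in _tokenize(members))
--     return (not in_class) if negated else in_class
-- ===== Notes on version B (the rewrite author's own statement) =====
-- stated objective: alternative
-- what changed: A decides membership in one interleaved while-loop with break; B first tokenizes the class into (range|escape|literal) tokens and then tests membership as any(token matches ch), with the escape elif-chain flattened into one boolean disjunction.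
import Mathlib
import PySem

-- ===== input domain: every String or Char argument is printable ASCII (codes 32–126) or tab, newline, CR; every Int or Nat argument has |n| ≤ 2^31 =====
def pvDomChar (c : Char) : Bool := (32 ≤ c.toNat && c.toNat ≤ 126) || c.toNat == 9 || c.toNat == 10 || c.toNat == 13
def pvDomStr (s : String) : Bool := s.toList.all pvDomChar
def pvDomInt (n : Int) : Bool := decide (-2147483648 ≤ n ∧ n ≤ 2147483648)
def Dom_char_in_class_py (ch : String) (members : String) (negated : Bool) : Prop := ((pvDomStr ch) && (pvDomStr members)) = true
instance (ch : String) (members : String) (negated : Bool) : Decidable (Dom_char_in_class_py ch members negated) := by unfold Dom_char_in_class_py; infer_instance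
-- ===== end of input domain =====

-- B tokenizes the class into range/escape/literal tokens and then tests them with any();
-- same cost as A, a different decomposition (objective: alternative).

-- ===== PORT A =====
-- the string " \t\n\r\f\v" from A, as a char list
def pvWsA : List Char := [' ', '\t', '\n', '\r', '\x0c', '\x0b']

-- A's escape elif-chain: returns whether the chain breaks (sets in_class) for escape char `esc`
def pvEscChainA (cs : List Char) (esc : Char) : Bool :=
  if esc = 'd' ∧ PySem.Chars.strIsdigit cs then true
  else if esc = 'D' ∧ ¬ (PySem.Chars.strIsdigit cs = true) then true
  else if esc = 'w' ∧ (PySem.Chars.strIsalnum cs = true ∨ cs = ['_']) then true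
  else if esc = 'W' ∧ ¬ (PySem.Chars.strIsalnum cs = true ∨ cs = ['_']) then true
  else if esc = 's' ∧ PySem.Chars.isIn cs pvWsA then true
  else if esc = 'S' ∧ ¬ (PySem.Chars.isIn cs pvWsA = true) then true
  else if cs = [esc] then true
  else false

-- A's while loop over the remaining suffix of members (i ↦ drop i; the length guards
-- i+2 < len / i+1 < len become the list patterns)
def pvLoopA (cs : List Char) : List Char → Bool
  | a :: b :: c :: tl =>
    if b = '-' then
      -- members[i] <= ch <= members[i+2] (Python str comparison = code-point lex order)
      if ¬ (cs < [a]) ∧ ¬ ([c] < cs) then true else pvLoopA cs tl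
    else if a = '\\' then
      if pvEscChainA cs b then true else pvLoopA cs (c :: tl)
    else
      if cs = [a] then true else pvLoopA cs (b :: c :: tl)
  | [a, b] =>
    if a = '\\' then pvEscChainA cs b
    else if cs = [a] then true else pvLoopA cs [b]
  | [a] => cs = [a]
  | [] => false

def char_in_class_py (ch : String) (members : String) (negated : Bool) : Bool :=
  let inClass := pvLoopA ch.toList members.toList
  if negated then !inClass else inClass

-- ===== PORT B =====
inductive PvTok where
  | range : Char → Char → PvTok
  | escape : Char → PvTok
  | literal : Char → PvTok
deriving DecidableEq, Repr

-- B's _tokenize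
def pvTokenize : List Char → List PvTok
  | a :: b :: c :: tl =>
    if b = '-' then PvTok.range a c :: pvTokenize tl
    else if a = '\\' then PvTok.escape b :: pvTokenize (c :: tl)
    else PvTok.literal a :: pvTokenize (b :: c :: tl)
  | [a, b] =>
    if a = '\\' then [PvTok.escape b]
    else PvTok.literal a :: pvTokenize [b]
  | [a] => [PvTok.literal a]
  | [] => []

-- B's _token_matches
def pvTokMatches (cs : List Char) : PvTok → Bool
  | PvTok.range lo hi => !decide (cs < [lo]) && !decide ([hi] < cs)
  | PvTok.escape e =>
      (e = 'd' && PySem.Chars.strIsdigit cs)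
      || (e = 'D' && !PySem.Chars.strIsdigit cs)
      || (e = 'w' && (PySem.Chars.strIsalnum cs || cs = ['_']))
      || (e = 'W' && !(PySem.Chars.strIsalnum cs || cs = ['_']))
      || (e = 's' && PySem.Chars.isIn cs pvWsA)
      || (e = 'S' && !PySem.Chars.isIn cs pvWsA)
      || cs = [e]
  | PvTok.literal a => cs = [a]

def char_in_class_py_alt (ch : String) (members : String) (negated : Bool) : Bool :=
  let inClass := (pvTokenize members.toList).any (pvTokMatches ch.toList)
  if negated then !inClass else inClass

-- ===== PRECONDITION & SPEC =====
def Spec_char_in_class_py (ch : String) (members : String) (negated : Bool) (out : Bool) : Prop := out = char_in_class_py_alt ch members negated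
instance (ch : String) (members : String) (negated : Bool) (out : Bool) : Decidable (Spec_char_in_class_py ch members negated out) := by unfold Spec_char_in_class_py; infer_instance

-- ===== CLAIM (what is proved, stated in full; the proofs are below) =====
def Claim_equal_char_in_class_py : Prop := ∀ (ch : String) (members : String) (negated : Bool), Dom_char_in_class_py ch members negated → Spec_char_in_class_py ch members negated (char_in_class_py ch members negated)

-- ===== LEMMAS AND PROOFS =====

-- A's escape chain breaks exactly when B's escape token matches
theorem pvEscChain_eq_tokMatches (cs : List Char) (e : Char) :
    pvEscChainA cs e = pvTokMatches cs (PvTok.escape e) := by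
  unfold pvEscChainA pvTokMatches
  split_ifs <;> simp_all
  tauto

-- A's loop over a suffix equals any-token-matches over the tokens of that suffix
theorem pvLoopA_eq_any (cs : List Char) (ms : List Char) :
    pvLoopA cs ms = (pvTokenize ms).any (pvTokMatches cs) := by
  induction ms using pvTokenize.induct with
  | case1 a c tl ih =>
    simp only [pvLoopA, pvTokenize, ih]
    by_cases h1 : cs < [a] <;> by_cases h2 : [c] < cs <;> simp [pvTokMatches, h1, h2]
  | case2 b c tl hb ih =>
    simp only [pvLoopA, pvTokenize, if_neg hb, ih, pvEscChain_eq_tokMatches]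
    cases h : pvTokMatches cs (PvTok.escape b) <;> simp [h]
  | case3 a b c tl hb ha ih =>
    simp only [pvLoopA, pvTokenize, if_neg hb, if_neg ha, List.any_cons, ih, pvTokMatches]
    by_cases h : cs = [a] <;> simp [h]
  | case4 b =>
    simp [pvLoopA, pvTokenize, pvEscChain_eq_tokMatches]
  | case5 a b ha ih =>
    simp only [pvLoopA, pvTokenize, if_neg ha, List.any_cons, pvTokMatches]
    by_cases h : cs = [a]
    · simp [h]
    · simp only [decide_eq_true_eq, h, decide_false, Bool.false_or]
      exact ih
  | case6 a =>
    simp [pvLoopA, pvTokenize, pvTokMatches]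
  | case7 =>
    simp [pvLoopA, pvTokenize]

-- ===== VERDICT (by name: the statement is the Claim_ definition above) =====
theorem char_in_class_py_spec : Claim_equal_char_in_class_py := by
  intro ch members negated _
  unfold Spec_char_in_class_py char_in_class_py char_in_class_py_alt
  rw [pvLoopA_eq_any]
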